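-- pv_equiv track=rewrite | github.com/AslamovNikita/VibeNote | utils/date_utils.py | auto_format_date_live
-- ===== SOURCE A (Python) =====
-- def auto_format_date_live(raw: str) -> str:
--
--     #реобразует вводимые цифры в формат ДД.ММ.ГГГГ ЧЧ:ММ
--     digits = "".join(c for c in raw if c.isdigit())
--     formatted = ""
--
--     if len(digits) > 0:
--         formatted += digits[:2]
--     if len(digits) > 2:
--         formatted += "." + digits[2:4]
--     if len(digits) > 4:
--         formatted += "." + digits[4:8]
--     if len(digits) > 8:
--         formatted += " " + digits[8:10]
--     if len(digits) > 10:
--         formatted += ":" + digits[10:12]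
--
--     return formatted
-- ===== SOURCE B (Python) =====
-- def auto_format_date_live(raw: str) -> str:
--     digits = "".join(c for c in raw if c.isdigit())
--     out = []
--     for i, c in enumerate(digits[:12]):
--         if i == 2 or i == 4:
--             out.append('.')
--         elif i == 8:
--             out.append(' ')
--         elif i == 10:
--             out.append(':')
--         out.append(c)
--     return "".join(out)
-- ===== Notes on version B (the rewrite author's own statement) =====
-- stated objective: simpler
-- what changed: Replaces the five length-threshold slice-and-concatenate branches with a single positional pass over the first 12 digits that inserts each separator just before the digit at its position.
import Mathlib
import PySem

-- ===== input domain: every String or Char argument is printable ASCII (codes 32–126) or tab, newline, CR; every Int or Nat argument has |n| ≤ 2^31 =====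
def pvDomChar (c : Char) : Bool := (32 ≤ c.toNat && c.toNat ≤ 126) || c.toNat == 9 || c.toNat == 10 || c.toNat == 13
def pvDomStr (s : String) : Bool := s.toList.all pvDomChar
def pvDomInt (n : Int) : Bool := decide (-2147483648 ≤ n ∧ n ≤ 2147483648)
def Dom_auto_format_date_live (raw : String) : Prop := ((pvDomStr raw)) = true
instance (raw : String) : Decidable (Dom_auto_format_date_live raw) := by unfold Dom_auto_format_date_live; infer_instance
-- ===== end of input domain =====

-- B replaces A's five length-threshold slice-and-concatenate branches with one positional
-- pass over the first 12 digits that inserts each separator before the digit at its position.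

-- ===== PORT A =====
def auto_format_date_live (raw : String) : String :=
  let digits := raw.toList.filter PySem.Chars.isdigit
  let formatted : List Char := []
  let formatted := if digits.length > 0 then formatted ++ PySem.List.slice digits none (some 2) else formatted
  let formatted := if digits.length > 2 then formatted ++ '.' :: PySem.List.slice digits (some 2) (some 4) else formatted
  let formatted := if digits.length > 4 then formatted ++ '.' :: PySem.List.slice digits (some 4) (some 8) else formatted
  let formatted := if digits.length > 8 then formatted ++ ' ' :: PySem.List.slice digits (some 8) (some 10) else formatted
  let formatted := if digits.length > 10 then formatted ++ ':' :: PySem.List.slice digits (some 10) (some 12) else formatted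
  String.ofList formatted

-- ===== PORT B =====
def auto_format_date_live_alt (raw : String) : String :=
  let digits := raw.toList.filter PySem.Chars.isdigit
  let out : List Char :=
    (PySem.List.enumerate (PySem.List.slice digits none (some 12))).foldl
      (fun acc ic =>
        let acc := if ic.1 = 2 ∨ ic.1 = 4 then acc ++ ['.']
          else if ic.1 = 8 then acc ++ [' ']
          else if ic.1 = 10 then acc ++ [':']
          else acc
        acc ++ [ic.2]) []
  String.ofList out

-- ===== PRECONDITION & SPEC =====
def Spec_auto_format_date_live (raw : String) (out : String) : Prop := out = auto_format_date_live_alt raw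
instance (raw : String) (out : String) : Decidable (Spec_auto_format_date_live raw out) := by unfold Spec_auto_format_date_live; infer_instance

-- ===== CLAIM (what is proved, stated in full; the proofs are below) =====
def Claim_equal_auto_format_date_live : Prop := ∀ (raw : String), Dom_auto_format_date_live raw → Spec_auto_format_date_live raw (auto_format_date_live raw)

-- ===== LEMMAS AND PROOFS =====

-- Both sides depend only on the digit list; this lemma states their equality for every list.
set_option maxHeartbeats 1000000 in
theorem core_eq (d : List Char) :
    (let formatted : List Char := []
     let formatted := if d.length > 0 then formatted ++ PySem.List.slice d none (some 2) else formatted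
     let formatted := if d.length > 2 then formatted ++ '.' :: PySem.List.slice d (some 2) (some 4) else formatted
     let formatted := if d.length > 4 then formatted ++ '.' :: PySem.List.slice d (some 4) (some 8) else formatted
     let formatted := if d.length > 8 then formatted ++ ' ' :: PySem.List.slice d (some 8) (some 10) else formatted
     if d.length > 10 then formatted ++ ':' :: PySem.List.slice d (some 10) (some 12) else formatted)
    =
    (PySem.List.enumerate (PySem.List.slice d none (some 12))).foldl
      (fun acc ic =>
        let acc := if ic.1 = 2 ∨ ic.1 = 4 then acc ++ ['.']
          else if ic.1 = 8 then acc ++ [' ']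
          else if ic.1 = 10 then acc ++ [':']
          else acc
        acc ++ [ic.2]) [] := by
  match d with
  | [] => rfl
  | [a] => simp [PySem.List.slice, PySem.List.clampIdx, PySem.List.enumerate, List.foldl]
  | [a,b] => simp [PySem.List.slice, PySem.List.clampIdx, PySem.List.enumerate, List.foldl]
  | [a,b,c] => simp [PySem.List.slice, PySem.List.clampIdx, PySem.List.enumerate, List.foldl]
  | [a,b,c,e] => simp [PySem.List.slice, PySem.List.clampIdx, PySem.List.enumerate, List.foldl]
  | [a,b,c,e,f] => simp [PySem.List.slice, PySem.List.clampIdx, PySem.List.enumerate, List.foldl]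
  | [a,b,c,e,f,g] => simp [PySem.List.slice, PySem.List.clampIdx, PySem.List.enumerate, List.foldl]
  | [a,b,c,e,f,g,h] => simp [PySem.List.slice, PySem.List.clampIdx, PySem.List.enumerate, List.foldl]
  | [a,b,c,e,f,g,h,i] => simp [PySem.List.slice, PySem.List.clampIdx, PySem.List.enumerate, List.foldl]
  | [a,b,c,e,f,g,h,i,j] => simp [PySem.List.slice, PySem.List.clampIdx, PySem.List.enumerate, List.foldl]
  | [a,b,c,e,f,g,h,i,j,k] => simp [PySem.List.slice, PySem.List.clampIdx, PySem.List.enumerate, List.foldl]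
  | [a,b,c,e,f,g,h,i,j,k,l] => simp [PySem.List.slice, PySem.List.clampIdx, PySem.List.enumerate, List.foldl]
  | [a,b,c,e,f,g,h,i,j,k,l,m] => simp [PySem.List.slice, PySem.List.clampIdx, PySem.List.enumerate, List.foldl]
  | a::b::c::e::f::g::h::i::j::k::l::m::rest =>
    simp [PySem.List.slice, PySem.List.clampIdx, PySem.List.enumerate, List.foldl]

-- ===== VERDICT (by name: the statement is the Claim_ definition above) =====
theorem auto_format_date_live_spec : Claim_equal_auto_format_date_live := by
  intro raw _
  show _ = _
  unfold auto_format_date_live auto_format_date_live_alt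
  exact congrArg String.ofList (core_eq _)
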